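-- pv_equiv track=rewrite | github.com/SunSlick2/ManageOnlineArchive | GatherKeywords_v01.py | generate_phrases_from_subject
-- ===== SOURCE A (Python) =====
-- def generate_phrases_from_subject(subject, stopwords):
--     """
--     Generate all contiguous phrases from a subject line.
--     - Lowercase only
--     - Whitespace tokenization
--     - Stopwords excluded only for single-word phrases
--     - Each phrase returned once per subject
--     """
--     if not subject:
--         return set()
--
--     subject = subject.lower()
--     words = subject.split()
--     n = len(words)
--
--     phrases = set()
--
--     for i in range(n):
--         for j in range(i + 1, n + 1):
--             phrase = " ".join(words[i:j])
--
--             # Exclude single-word stopwords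
--             if j - i == 1 and phrase in stopwords:
--                 continue
--
--             phrases.add(phrase)
--
--     return phrases
-- ===== SOURCE B (Python) =====
-- def generate_phrases_from_subject(subject, stopwords):
--     if not subject:
--         return set()
--     words = subject.lower().split()
--     phrases = set()
--     for i in range(len(words)):
--         cur = words[i]
--         if cur not in stopwords:
--             phrases.add(cur)
--         for j in range(i + 1, len(words)):
--             cur = cur + " " + words[j]
--             phrases.add(cur)
--     return phrases
-- ===== Notes on version B (the rewrite author's own statement) =====
-- stated objective: alternative
-- what changed: B replaces the inner ' '.join(words[i:j]) slice-and-rejoin with a running accumulator string extended one word per step, and hoists the single-word stopword filter out of the inner loop so only singletons are ever tested.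
import Mathlib
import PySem

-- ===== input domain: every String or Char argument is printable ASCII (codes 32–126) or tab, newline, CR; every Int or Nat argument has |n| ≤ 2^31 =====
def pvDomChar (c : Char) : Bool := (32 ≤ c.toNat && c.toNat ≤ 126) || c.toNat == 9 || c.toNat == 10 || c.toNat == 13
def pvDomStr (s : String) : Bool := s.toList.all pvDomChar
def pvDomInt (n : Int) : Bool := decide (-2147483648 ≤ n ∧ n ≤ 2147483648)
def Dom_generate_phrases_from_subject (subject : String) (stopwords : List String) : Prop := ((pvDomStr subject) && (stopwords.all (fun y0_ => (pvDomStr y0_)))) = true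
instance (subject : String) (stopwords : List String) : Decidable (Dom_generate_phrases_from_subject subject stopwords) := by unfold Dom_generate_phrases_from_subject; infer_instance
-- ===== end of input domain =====

-- B builds each phrase by extending a running accumulator string instead of re-joining a slice,
-- and hoists the single-word stopword filter out of the inner loop; same result set, alternative decomposition.

-- ===== PORT A =====
def generate_phrases_from_subject (subject : String) (stopwords : List String) : List String :=
  if subject == "" then PySem.Set.empty
  else
    let subject := PySem.Str.lower subject
    let words := PySem.Str.split₀ subject
    let n : Int := words.length
    (PySem.List.pyRange 0 n).foldl (fun phrases i =>
      (PySem.List.pyRange (i + 1) (n + 1)).foldl (fun phrases j =>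
        let phrase := PySem.Str.join " " (PySem.List.slice words (some i) (some j))
        if (j - i == 1) && stopwords.contains phrase then phrases
        else PySem.Set.add phrases phrase) phrases) PySem.Set.empty

-- ===== PORT B =====
-- words[i] / words[j] are always in range here, so pyGetD with a dummy default is exact
def generate_phrases_from_subject_alt (subject : String) (stopwords : List String) : List String :=
  if subject == "" then PySem.Set.empty
  else
    let words := PySem.Str.split₀ (PySem.Str.lower subject)
    let n : Int := words.length
    (PySem.List.pyRange 0 n).foldl (fun phrases i =>
      let cur := PySem.List.pyGetD words i ""
      let phrases := if stopwords.contains cur then phrases else PySem.Set.add phrases cur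
      ((PySem.List.pyRange (i + 1) n).foldl
        (fun (st : String × List String) j =>
          let cur := st.1 ++ " " ++ PySem.List.pyGetD words j ""
          (cur, PySem.Set.add st.2 cur)) (cur, phrases)).2) PySem.Set.empty

-- ===== PRECONDITION & SPEC =====
def Spec_generate_phrases_from_subject (subject : String) (stopwords : List String) (out : List String) : Prop := out = generate_phrases_from_subject_alt subject stopwords
instance (subject : String) (stopwords : List String) (out : List String) : Decidable (Spec_generate_phrases_from_subject subject stopwords out) := by unfold Spec_generate_phrases_from_subject; infer_instance

-- ===== CLAIM (what is proved, stated in full; the proofs are below) =====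
def Claim_equal_generate_phrases_from_subject : Prop := ∀ (subject : String) (stopwords : List String), Dom_generate_phrases_from_subject subject stopwords → Spec_generate_phrases_from_subject subject stopwords (generate_phrases_from_subject subject stopwords)

-- ===== LEMMAS AND PROOFS =====

-- " ".join over a one-element list is that element
lemma str_join_singleton (p : String) : PySem.Str.join " " [p] = p := by
  apply String.toList_inj.mp
  simp [PySem.Str.toList_join, PySem.Chars.join_singleton]

-- " ".join over a nonempty list extended by one word
lemma chars_join_snoc (sep q : List Char) (ps : List (List Char)) (h : ps ≠ []) :
    PySem.Chars.join sep (ps ++ [q]) = PySem.Chars.join sep ps ++ sep ++ q := by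
  induction ps with
  | nil => simp at h
  | cons a rest ih =>
    cases rest with
    | nil => simp [PySem.Chars.join_cons_cons, PySem.Chars.join_singleton]
    | cons b rest' =>
      have h' : (a :: b :: rest') ++ [q] = a :: b :: (rest' ++ [q]) := by simp
      rw [h', PySem.Chars.join_cons_cons]
      have hih := ih (by simp)
      rw [List.cons_append] at hih
      rw [hih, PySem.Chars.join_cons_cons]
      simp [List.append_assoc]

lemma str_join_snoc (xs : List String) (y : String) (h : xs ≠ []) :
    PySem.Str.join " " (xs ++ [y]) = PySem.Str.join " " xs ++ " " ++ y := by
  apply String.toList_inj.mp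
  simp only [PySem.Str.toList_join, String.toList_append, List.map_append, List.map_cons,
    List.map_nil]
  exact chars_join_snoc _ _ _ (by simpa using h)

-- slice ws i (k+1) = slice ws i k ++ [ws[k]]  (natural bounds, i ≤ k < length)
lemma slice_snoc (ws : List String) (i k : Nat) (hik : i ≤ k) (hk : k < ws.length) :
    PySem.List.slice ws (some (i : Int)) (some ((k : Int) + 1))
      = PySem.List.slice ws (some (i : Int)) (some (k : Int)) ++ [ws.getD k ""] := by
  have h1 : ((k : Int) + 1) = (((k + 1 : Nat)) : Int) := by push_cast; ring
  rw [h1, PySem.List.slice_natCast, PySem.List.slice_natCast]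
  have h2 : k + 1 - i = (k - i) + 1 := by omega
  rw [h2, List.take_add_one]
  congr 1
  rw [List.getElem?_drop]
  have h3 : i + (k - i) = k := by omega
  rw [h3, List.getElem?_eq_getElem hk, List.getD_eq_getElem ws "" hk]
  rfl

set_option maxHeartbeats 1600000 in
-- the inner tail: A's slice-join fold from j = k+1 equals B's accumulator fold from j = k
lemma inner_tail (ws stopwords : List String) (i : Nat) :
    ∀ (d k : Nat), d = ws.length - k → i < k → k ≤ ws.length →
    ∀ (s : List String) (cur : String),
    cur = PySem.Str.join " " (PySem.List.slice ws (some (i : Int)) (some (k : Int))) →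
    (PySem.List.pyRange ((k : Int) + 1) ((ws.length : Int) + 1)).foldl
      (fun phrases j =>
        let phrase := PySem.Str.join " " (PySem.List.slice ws (some (i : Int)) (some j))
        if (j - (i : Int) == 1) && stopwords.contains phrase then phrases
        else PySem.Set.add phrases phrase) s
    = ((PySem.List.pyRange ((k : Int)) ((ws.length : Int))).foldl
        (fun (st : String × List String) j =>
          let cur := st.1 ++ " " ++ PySem.List.pyGetD ws j ""
          (cur, PySem.Set.add st.2 cur)) (cur, s)).2 := by
  intro d
  induction d with
  | zero =>
    intro k hd hik hk s cur hcur
    have hkeq : k = ws.length := by omega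
    subst hkeq
    have e1 : PySem.List.pyRange ((ws.length : Int) + 1) ((ws.length : Int) + 1) = [] := by
      simp [PySem.List.pyRange]
    have e2 : PySem.List.pyRange ((ws.length : Int)) ((ws.length : Int)) = [] := by
      simp [PySem.List.pyRange]
    rw [e1, e2]
    rfl
  | succ d ih =>
    intro k hd hik hk s cur hcur
    have hklt : k < ws.length := by omega
    have hA : PySem.List.pyRange ((k : Int) + 1) ((ws.length : Int) + 1)
        = ((k : Int) + 1) :: PySem.List.pyRange ((k : Int) + 1 + 1) ((ws.length : Int) + 1) :=
      PySem.List.pyRange_one_cons (by omega)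
    have hB : PySem.List.pyRange ((k : Int)) ((ws.length : Int))
        = (k : Int) :: PySem.List.pyRange ((k : Int) + 1) ((ws.length : Int)) :=
      PySem.List.pyRange_one_cons (by omega)
    rw [hA, hB]
    simp only [List.foldl_cons]
    have hcond : (((k : Int) + 1 - (i : Int)) == 1) = false := by
      simp only [beq_eq_false_iff_ne]
      intro hcontra; omega
    rw [hcond]
    simp only [Bool.false_and, Bool.false_eq_true, if_false]
    have hcur' : cur ++ " " ++ PySem.List.pyGetD ws (k : Int) ""
        = PySem.Str.join " " (PySem.List.slice ws (some (i : Int)) (some ((k : Int) + 1))) := by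
      rw [slice_snoc ws i k (by omega) hklt]
      rw [str_join_snoc]
      · rw [hcur, PySem.List.pyGetD_natCast]
      · rw [PySem.List.slice_natCast]
        intro hnil
        have := congrArg List.length hnil
        simp [List.length_take, List.length_drop] at this
        omega
    have harith : ((k : Int) + 1) = (((k + 1 : Nat)) : Int) := by push_cast; ring
    rw [harith] at hcur' ⊢
    rw [hcur']
    exact ih (k + 1) (by omega) (by omega) (by omega) _ _ rfl

-- one outer iteration: A's inner loop = B's inner loop
lemma outer_step (ws stopwords : List String) (i : Nat) (hi : i < ws.length) (s : List String) :
    (PySem.List.pyRange ((i : Int) + 1) ((ws.length : Int) + 1)).foldl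
      (fun phrases j =>
        let phrase := PySem.Str.join " " (PySem.List.slice ws (some (i : Int)) (some j))
        if (j - (i : Int) == 1) && stopwords.contains phrase then phrases
        else PySem.Set.add phrases phrase) s
    = (let cur := PySem.List.pyGetD ws (i : Int) ""
       let phrases := if stopwords.contains cur then s else PySem.Set.add s cur
       ((PySem.List.pyRange ((i : Int) + 1) ((ws.length : Int))).foldl
        (fun (st : String × List String) j =>
          let cur := st.1 ++ " " ++ PySem.List.pyGetD ws j ""
          (cur, PySem.Set.add st.2 cur)) (cur, phrases)).2) := by
  have hA : PySem.List.pyRange ((i : Int) + 1) ((ws.length : Int) + 1)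
      = ((i : Int) + 1) :: PySem.List.pyRange ((i : Int) + 1 + 1) ((ws.length : Int) + 1) :=
    PySem.List.pyRange_one_cons (by omega)
  rw [hA]
  simp only [List.foldl_cons]
  have hsl : PySem.List.slice ws (some (i : Int)) (some ((i : Int) + 1)) = [ws.getD i ""] := by
    have h1 : ((i : Int) + 1) = (((i + 1 : Nat)) : Int) := by push_cast; ring
    rw [h1, PySem.List.slice_natCast]
    have h2 : i + 1 - i = 1 := by omega
    rw [h2, List.take_one, List.head?_drop, List.getElem?_eq_getElem hi,
      List.getD_eq_getElem ws "" hi]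
    rfl
  have hfirst : (((i : Int) + 1 - (i : Int)) == 1) = true := by simp
  rw [hfirst]
  simp only [Bool.true_and, hsl, str_join_singleton]
  have hget : PySem.List.pyGetD ws (i : Int) "" = ws.getD i "" := PySem.List.pyGetD_natCast ws i ""
  rw [hget]
  have hcur0 : ws.getD i "" = PySem.Str.join " " (PySem.List.slice ws (some (i : Int)) (some (((i : Nat) + 1 : Nat) : Int))) := by
    have h1 : (((i + 1 : Nat)) : Int) = ((i : Int) + 1) := by push_cast; ring
    rw [h1, hsl, str_join_singleton]
  have harith : ((i : Int) + 1) = (((i + 1 : Nat)) : Int) := by push_cast; ring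
  by_cases hsw : stopwords.contains (ws.getD i "")
  · simp only [hsw, if_true, PySem.Set.add]
    rw [harith]
    exact inner_tail ws stopwords i (ws.length - (i + 1)) (i + 1) rfl (by omega) (by omega) s _ hcur0
  · simp only [hsw, Bool.false_eq_true, if_false]
    rw [harith]
    exact inner_tail ws stopwords i (ws.length - (i + 1)) (i + 1) rfl (by omega) (by omega) _ _ hcur0

-- ===== VERDICT (by name: the statement is the Claim_ definition above) =====
theorem generate_phrases_from_subject_spec : Claim_equal_generate_phrases_from_subject := by
  intro subject stopwords _
  unfold Spec_generate_phrases_from_subject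
  unfold generate_phrases_from_subject generate_phrases_from_subject_alt
  by_cases hs : subject == ""
  · simp [hs]
  · simp only [hs, Bool.false_eq_true, if_false]
    set ws := PySem.Str.split₀ (PySem.Str.lower subject) with hws
    rw [PySem.List.pyRange_zero_natCast, List.foldl_map, List.foldl_map]
    apply List.foldl_ext
    intro acc i hi
    have hi' : i < ws.length := List.mem_range.mp hi
    exact outer_step ws stopwords i hi' acc
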